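-- pv_equiv track=rewrite | github.com/Sibgat0987/Line_Encoding_And_Modulation | B8ZS.py | b8zs_encoding
-- ===== SOURCE A (Python) =====
-- def b8zs_encoding(bitstream):
--     encoded_signal = []
--     zero_count = 0
--     current_polarity = 1
--
--     for bit in bitstream:
--         if bit == '1':
--             encoded_signal.append(current_polarity)
--             zero_count = 0
--             current_polarity = -current_polarity
--         elif bit == '0':
--             zero_count += 1
--             if zero_count == 8:
--                 # B8ZS substitution: 000VB0VB
--                 for _ in range(7):
--                     encoded_signal.pop()
--                 encoded_signal.extend([0, 0, 0, -current_polarity, current_polarity, 0, current_polarity, -current_polarity])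
--                 zero_count = 0
--             else:
--                 encoded_signal.append(0)
--
--     encoded_signal.append(encoded_signal[-1])  # To complete the last step for plotting
--     return encoded_signal
-- ===== SOURCE B (Python) =====
-- def b8zs_encoding(bitstream):
--     # Run-length approach: scan maximal runs of '0' between '1's and emit a
--     # closed-form chunk per run ((k//8) substitution blocks + (k%8) zeros).
--     bits = [c for c in bitstream if c in ('0', '1')]
--     out = []
--     pol = 1
--     i = 0
--     n = len(bits)
--     while True:
--         j = i
--         while j < n and bits[j] == '0':
--             j += 1
--         k = j - i
--         out.extend((k // 8) * [0, 0, 0, -pol, pol, 0, pol, -pol])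
--         out.extend((k % 8) * [0])
--         if j == n:
--             break
--         out.append(pol)
--         pol = -pol
--         i = j + 1
--     out.append(out[-1])
--     return out
-- ===== Notes on version B (the rewrite author's own statement) =====
-- stated objective: alternative
-- what changed: B filters the bit characters once, then scans maximal zero-runs between '1's and emits each run as a closed-form chunk ((k//8) substitution blocks plus (k%8) zeros), so A's bit-by-bit zero counter and its pop-7 backtracking disappear.
import Mathlib
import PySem

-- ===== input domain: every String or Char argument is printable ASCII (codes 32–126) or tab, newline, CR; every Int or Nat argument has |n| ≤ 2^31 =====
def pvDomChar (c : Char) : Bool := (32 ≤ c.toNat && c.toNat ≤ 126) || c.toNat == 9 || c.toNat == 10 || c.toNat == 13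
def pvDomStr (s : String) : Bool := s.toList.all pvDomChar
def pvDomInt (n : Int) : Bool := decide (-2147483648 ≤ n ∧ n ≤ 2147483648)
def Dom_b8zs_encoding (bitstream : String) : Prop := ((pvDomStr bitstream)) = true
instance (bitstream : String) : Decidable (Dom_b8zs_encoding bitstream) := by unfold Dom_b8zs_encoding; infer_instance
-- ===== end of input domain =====

-- B is an alternative run-length formulation of B8ZS (equal return value; no speed claim).

-- ===== PORT A =====
-- one step of A's for-loop; state = (encoded_signal, zero_count, current_polarity)
def pvStepA (st : List Int × Int × Int) (bit : Char) : List Int × Int × Int :=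
  match st with
  | (enc, zc, pol) =>
    if bit = '1' then (enc ++ [pol], 0, -pol)
    else if bit = '0' then
      let zc := zc + 1
      if zc = 8 then
        ((List.range 7).foldl (fun l _ => l.dropLast) enc
           ++ [0, 0, 0, -pol, pol, 0, pol, -pol], 0, pol)
      else (enc ++ [(0 : Int)], zc, pol)
    else st

def b8zs_encoding (bitstream : String) : List Int :=
  let st := bitstream.toList.foldl pvStepA ([], 0, 1)
  let enc := st.1
  match PySem.List.pyGet? enc (-1) with
  | some x => enc ++ [x]
  | none => enc   -- Python raises IndexError here; excluded by Pre_

-- ===== PORT B =====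
def pvIsBit (c : Char) : Bool := c = '0' || c = '1'

-- one maximal zero-run, then (if any) the following '1', then recurse
def pvRuns (bits : List Char) (pol : Int) : List Int :=
  let k := (bits.takeWhile (· = '0')).length
  let chunk := (List.replicate (k / 8) [0, 0, 0, -pol, pol, 0, pol, -pol]).flatten
                 ++ List.replicate (k % 8) (0 : Int)
  match h : bits.dropWhile (· = '0') with
  | [] => chunk
  | _ :: t => chunk ++ pol :: pvRuns t (-pol)
termination_by bits.length
decreasing_by
  have := List.length_dropWhile_le (p := fun c => decide (c = '0')) (l := bits)
  simp [h] at this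
  omega

def b8zs_encoding_alt (bitstream : String) : List Int :=
  let out := pvRuns (bitstream.toList.filter pvIsBit) 1
  match PySem.List.pyGet? out (-1) with
  | some x => out ++ [x]
  | none => out   -- Python raises IndexError here; excluded by Pre_

-- ===== PRECONDITION & SPEC =====
-- Pre_ excludes exactly the inputs with no '0'/'1' character, on which A's
-- final `encoded_signal[-1]` raises IndexError (B raises there too).
def Pre_b8zs_encoding (bitstream : String) : Prop :=
  '0' ∈ bitstream.toList ∨ '1' ∈ bitstream.toList
instance (bitstream : String) : Decidable (Pre_b8zs_encoding bitstream) := by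
  unfold Pre_b8zs_encoding; infer_instance

def pvWitness_b8zs_encoding : String := "10100000001"

def Spec_b8zs_encoding (bitstream : String) (out : List Int) : Prop := out = b8zs_encoding_alt bitstream
instance (bitstream : String) (out : List Int) : Decidable (Spec_b8zs_encoding bitstream out) := by unfold Spec_b8zs_encoding; infer_instance

-- ===== CLAIM (what is proved, stated in full; the proofs are below) =====
def Claim_equal_b8zs_encoding : Prop := ∀ (bitstream : String), Dom_b8zs_encoding bitstream → Pre_b8zs_encoding bitstream → Spec_b8zs_encoding bitstream (b8zs_encoding bitstream)

-- ===== LEMMAS AND PROOFS =====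

-- non-bit characters leave A's state unchanged, so the fold may be filtered
theorem pvFoldA_filter (l : List Char) (st : List Int × Int × Int) :
    l.foldl pvStepA st = (l.filter pvIsBit).foldl pvStepA st := by
  induction l generalizing st with
  | nil => rfl
  | cons c t ih =>
    by_cases h1 : c = '1'
    · simp [h1, pvIsBit, List.foldl_cons, ih]
    · by_cases h0 : c = '0'
      · simp [h0, pvIsBit, List.foldl_cons, ih]
      · have : pvStepA st c = st := by simp [pvStepA, h0, h1]
        simp [pvIsBit, h0, h1, List.foldl_cons, this, ih]

-- popping n times removes n trailing elements
theorem pvIterDrop (n : Nat) (X : List Int) (a : Int) :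
    (List.range n).foldl (fun l _ => l.dropLast) (X ++ List.replicate n a) = X := by
  induction n generalizing X with
  | zero => simp
  | succ m ih =>
    have : X ++ List.replicate (m + 1) a = (X ++ [a]) ++ List.replicate m a := by
      simp [List.replicate_succ]
    rw [this, List.range_succ, List.foldl_append, ih (X ++ [a])]
    simp

def pvZChunk (p : Int) (k : Nat) : List Int :=
  (List.replicate (k / 8) [0, 0, 0, -p, p, 0, p, -p]).flatten ++ List.replicate (k % 8) (0 : Int)

-- A on a run of k zeros, starting with zero_count 0
theorem pvFoldA_zeros (k : Nat) (acc : List Int) (p : Int) :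
    (List.replicate k '0').foldl pvStepA (acc, 0, p)
      = (acc ++ pvZChunk p k, ((k % 8 : Nat) : Int), p) := by
  induction k with
  | zero => simp [pvZChunk]
  | succ m ih =>
    rw [List.replicate_succ', List.foldl_append, ih]
    simp only [List.foldl_cons, List.foldl_nil, pvStepA, if_true]
    by_cases h7 : m % 8 = 7
    · have h1 : ((m % 8 : Nat) : Int) + 1 = 8 := by omega
      have hd : (m + 1) / 8 = m / 8 + 1 := by omega
      have hm : (m + 1) % 8 = 0 := by omega
      have hrep : List.replicate (m % 8) (0 : Int) = List.replicate 7 0 := by rw [h7]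
      rw [if_pos h1]
      have hsplit : acc ++ pvZChunk p m
          = (acc ++ (List.replicate (m / 8) [0, 0, 0, -p, p, 0, p, -p]).flatten)
              ++ List.replicate 7 (0 : Int) := by
        simp [pvZChunk, hrep]
      rw [hsplit, pvIterDrop]
      simp [pvZChunk, hd, hm, List.replicate_succ']
    · have h1 : ¬ (((m % 8 : Nat) : Int) + 1 = 8) := by omega
      have hd : (m + 1) / 8 = m / 8 := by omega
      have hm : (m + 1) % 8 = m % 8 + 1 := by omega
      rw [if_neg h1]
      simp [pvZChunk, hd, hm, List.replicate_succ']

-- main invariant: on a pure '0'/'1' list, A's fold builds exactly B's runs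
theorem pvFoldA_runs (bits : List Char) (p : Int) (acc : List Int)
    (hb : ∀ c ∈ bits, c = '0' ∨ c = '1') :
    (bits.foldl pvStepA (acc, 0, p)).1 = acc ++ pvRuns bits p := by
  induction bits, p using pvRuns.induct generalizing acc with
  | case1 bits pol h =>
    have hbits : bits = List.replicate (bits.takeWhile (· = '0')).length '0' := by
      conv_lhs => rw [← List.takeWhile_append_dropWhile (p := fun c => decide (c = '0')) (l := bits)]
      rw [h, List.append_nil]
      apply List.eq_replicate_of_mem
      intro b hbm
      simpa using List.mem_takeWhile_imp hbm
    rw [pvRuns]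
    split
    · conv_lhs => rw [hbits]
      rw [pvFoldA_zeros]
      rw [List.length_replicate.symm.trans (congrArg List.length hbits.symm)]
      rfl
    · rename_i heq
      rw [h] at heq
      exact absurd heq (by simp)
  | case2 bits pol c t h ih =>
    have htw : bits.takeWhile (· = '0') = List.replicate (bits.takeWhile (· = '0')).length '0' := by
      apply List.eq_replicate_of_mem
      intro b hbm
      simpa using List.mem_takeWhile_imp hbm
    have hbits : bits = List.replicate (bits.takeWhile (· = '0')).length '0' ++ c :: t := by
      conv_lhs => rw [← List.takeWhile_append_dropWhile (p := fun c => decide (c = '0')) (l := bits)]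
      rw [h, ← htw]
    have hc0 : ¬ (c = '0') := by
      have hl : 0 < (bits.dropWhile (fun c => decide (c = '0'))).length := by simp [h]
      have := List.dropWhile_get_zero_not (p := fun c => decide (c = '0')) bits hl
      simpa [h] using this
    have hc1 : c = '1' := by
      have hcmem : c ∈ bits := by rw [hbits]; simp
      rcases hb c hcmem with h' | h'
      · exact absurd h' hc0
      · exact h'
    have hbt : ∀ x ∈ t, x = '0' ∨ x = '1' := by
      intro x hx
      exact hb x (by rw [hbits]; simp [hx])
    conv_lhs => rw [hbits]
    rw [List.foldl_append, pvFoldA_zeros, List.foldl_cons]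
    have hstep : pvStepA (acc ++ pvZChunk pol (bits.takeWhile (· = '0')).length,
        (((bits.takeWhile (· = '0')).length % 8 : Nat) : Int), pol) c
        = (acc ++ pvZChunk pol (bits.takeWhile (· = '0')).length ++ [pol], 0, -pol) := by
      rw [hc1]; simp [pvStepA]
    rw [hstep, ih _ hbt]
    conv_rhs => rw [pvRuns]
    split
    · rename_i heq
      rw [h] at heq
      exact absurd heq (by simp)
    · rename_i c' t' heq
      rw [h] at heq
      cases heq
      simp [pvZChunk]

-- the two ports compute the same list before the final duplicate-last step
theorem pvCore_eq (bitstream : String) :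
    (bitstream.toList.foldl pvStepA ([], 0, 1)).1
      = pvRuns (bitstream.toList.filter pvIsBit) 1 := by
  rw [pvFoldA_filter]
  have hb : ∀ c ∈ bitstream.toList.filter pvIsBit, c = '0' ∨ c = '1' := by
    intro c hc
    have := List.of_mem_filter hc
    simp [pvIsBit] at this
    tauto
  simpa using pvFoldA_runs (bitstream.toList.filter pvIsBit) 1 [] hb

-- ===== VERDICT (by name: the statement is the Claim_ definition above) =====
theorem b8zs_encoding_spec : Claim_equal_b8zs_encoding := by
  intro bs _ _
  show b8zs_encoding bs = b8zs_encoding_alt bs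
  simp only [b8zs_encoding, b8zs_encoding_alt]
  rw [pvCore_eq]
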